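-- pv_equiv track=rewrite | github.com/poudels14/maestro-cloud | dns-proxy.py | compute_alias_owners
-- ===== SOURCE A (Python) =====
-- def derive_alias(cluster_name):
--     if "-" not in cluster_name:
--         return cluster_name
--     base, suffix = cluster_name.rsplit("-", 1)
--     if base and len(suffix) == 4 and suffix.isalnum():
--         return base
--     return cluster_name
--
-- def compute_alias_owners(my_cluster, my_alias, peers):
--     claims = {}
--
--     def add_claim(alias, canonical):
--         claims.setdefault(alias, set()).add(canonical)
--
--     add_claim(my_alias, my_cluster)
--     for canonical in peers.keys():
--         add_claim(derive_alias(canonical), canonical)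
--
--     alias_owners = {}
--     for alias, claimants in claims.items():
--         if len(claimants) == 1:
--             alias_owners[alias] = next(iter(claimants))
--     return alias_owners
-- ===== SOURCE B (Python) =====
-- def derive_alias(cluster_name):
--     if "-" not in cluster_name:
--         return cluster_name
--     base, suffix = cluster_name.rsplit("-", 1)
--     if base and len(suffix) == 4 and suffix.isalnum():
--         return base
--     return cluster_name
--
--
-- def compute_alias_owners(my_cluster, my_alias, peers):
--     # One pass over the claims: keep a provisional owner per alias and a set of
--     # aliases already known to be claimed by two different canonicals.
--     owner = {}
--     conflicted = set()
--     for alias, canonical in [(my_alias, my_cluster)] + [(derive_alias(c), c) for c in peers]: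
--         if alias in conflicted:
--             continue
--         prev = owner.get(alias)
--         if prev is None:
--             owner[alias] = canonical
--         elif prev != canonical:
--             del owner[alias]
--             conflicted.add(alias)
--     return owner
-- ===== Notes on version B (the rewrite author's own statement) =====
-- stated objective: alternative
-- what changed: Instead of building a per-alias set of claimants and then filtering aliases with exactly one claimant in a second pass, B fuses both passes into one fold that maintains an owner dict plus a conflicted set, deleting an owner the moment a second distinct canonical claims its alias.
import Mathlib
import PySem

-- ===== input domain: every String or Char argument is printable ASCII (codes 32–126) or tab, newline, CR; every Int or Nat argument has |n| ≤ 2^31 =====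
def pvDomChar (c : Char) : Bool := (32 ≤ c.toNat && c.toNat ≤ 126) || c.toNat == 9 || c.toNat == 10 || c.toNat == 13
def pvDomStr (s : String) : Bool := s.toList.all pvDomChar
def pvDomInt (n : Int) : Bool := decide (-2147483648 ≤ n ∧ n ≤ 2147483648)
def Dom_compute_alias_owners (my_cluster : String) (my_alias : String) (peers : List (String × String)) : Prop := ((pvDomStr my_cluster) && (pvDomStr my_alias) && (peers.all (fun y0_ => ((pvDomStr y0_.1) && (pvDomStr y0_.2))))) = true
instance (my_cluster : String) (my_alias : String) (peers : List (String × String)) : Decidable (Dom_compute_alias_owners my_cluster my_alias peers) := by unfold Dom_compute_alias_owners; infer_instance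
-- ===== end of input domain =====

-- B replaces A's "per-alias claimant sets, then filter the singletons" two-phase
-- computation by a single fold maintaining an owner dict and a conflicted set.

-- ===== PORT A =====
-- shared module helper (used verbatim by both A and B)
def derive_alias (cluster_name : String) : String :=
  if PySem.Str.isIn "-" cluster_name = false then cluster_name
  else
    -- hand port of cluster_name.rsplit("-", 1): exact here because "-" occurs in
    -- cluster_name, so it splits at the index of the LAST "-" (rfind ≥ 0)
    let i := (PySem.Str.rfind cluster_name "-").toNat
    let base := PySem.Str.slice cluster_name none (some (i : Int))
    let suffix := PySem.Str.slice cluster_name (some ((i : Int) + 1)) none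
    if base ≠ "" ∧ PySem.Str.len suffix = 4 ∧ PySem.Str.strIsalnum suffix = true then base
    else cluster_name

def pvAddClaim (claims : PySem.Dict String (PySem.Set String))
    (aliasName canonical : String) : PySem.Dict String (PySem.Set String) :=
  claims.insert aliasName (PySem.Set.add (claims.getD aliasName PySem.Set.empty) canonical)

def compute_alias_owners (my_cluster : String) (my_alias : String)
    (peers : List (String × String)) : List (String × String) :=
  let claims1 := pvAddClaim PySem.Dict.empty my_alias my_cluster
  let claims := (PySem.List.dedup (peers.map Prod.fst)).foldl
      (fun d canonical => pvAddClaim d (derive_alias canonical) canonical) claims1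
  -- len(claimants) == 1, so next(iter(claimants)) is the set's single element
  (claims.items.foldl
      (fun ao p => if PySem.Set.len p.2 = 1 then ao.insert p.1 (p.2.headD "") else ao)
      PySem.Dict.empty).items

-- ===== PORT B =====
def pvStep (st : PySem.Dict String String × PySem.Set String) (p : String × String) :
    PySem.Dict String String × PySem.Set String :=
  if PySem.Set.contains st.2 p.1 then st
  else
    match st.1.get? p.1 with
    | none => (st.1.insert p.1 p.2, st.2)
    | some prev => if prev ≠ p.2 then (st.1.erase p.1, PySem.Set.add st.2 p.1) else st

def compute_alias_owners_alt (my_cluster : String) (my_alias : String)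
    (peers : List (String × String)) : List (String × String) :=
  (((my_alias, my_cluster) ::
      (PySem.List.dedup (peers.map Prod.fst)).map (fun c => (derive_alias c, c))).foldl
    pvStep (PySem.Dict.empty, PySem.Set.empty)).1.items

-- ===== PRECONDITION & SPEC =====
def Spec_compute_alias_owners (my_cluster : String) (my_alias : String) (peers : List (String × String)) (out : List (String × String)) : Prop := out = compute_alias_owners_alt my_cluster my_alias peers
instance (my_cluster : String) (my_alias : String) (peers : List (String × String)) (out : List (String × String)) : Decidable (Spec_compute_alias_owners my_cluster my_alias peers out) := by unfold Spec_compute_alias_owners; infer_instance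

-- ===== CLAIM (what is proved, stated in full; the proofs are below) =====
def Claim_equal_compute_alias_owners : Prop := ∀ (my_cluster : String) (my_alias : String) (peers : List (String × String)), Dom_compute_alias_owners my_cluster my_alias peers → Spec_compute_alias_owners my_cluster my_alias peers (compute_alias_owners my_cluster my_alias peers)

-- ===== LEMMAS AND PROOFS =====

-- A's final pass, as a list function: aliases with exactly one claimant, with it
def pvOwnersOf (items : List (String × PySem.Set String)) : List (String × String) :=
  (items.filter (fun p => p.2.length == 1)).map (fun p => (p.1, p.2.headD ""))

-- the invariant relating A's claims dict to B's (owner, conflicted) state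
def pvInv (d : PySem.Dict String (PySem.Set String))
    (o : PySem.Dict String String) (cf : PySem.Set String) : Prop :=
  d.keys.Nodup ∧ (∀ p ∈ d.items, p.2 ≠ []) ∧ o.items = pvOwnersOf d.items ∧
  (∀ x : String, x ∈ cf ↔ ∃ s, (x, s) ∈ d.items ∧ 2 ≤ s.length)

theorem pvOwnersOf_append (xs ys : List (String × PySem.Set String)) :
    pvOwnersOf (xs ++ ys) = pvOwnersOf xs ++ pvOwnersOf ys := by
  simp [pvOwnersOf]

theorem pvMem_upd_iff (items : List (String × PySem.Set String)) (a x : String)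
    (s' t : PySem.Set String) :
    ((x, t) ∈ items.map (fun p => if p.1 == a then (a, s') else p)) ↔
      ((x = a ∧ t = s' ∧ ∃ s, (a, s) ∈ items) ∨ (x ≠ a ∧ (x, t) ∈ items)) := by
  constructor
  · intro h
    obtain ⟨q, hq, he⟩ := List.mem_map.mp h
    by_cases hqa : q.1 = a
    · rw [if_pos (by simp [hqa])] at he
      obtain ⟨h1, h2⟩ := Prod.mk.injEq .. ▸ he
      refine Or.inl ⟨h1.symm, h2.symm, q.2, ?_⟩
      rw [← hqa]
      exact hq
    · rw [if_neg (by simp [hqa])] at he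
      subst he
      exact Or.inr ⟨hqa, hq⟩
  · intro h
    rcases h with ⟨hxa, hts, s, hs⟩ | ⟨hxa, hmem⟩
    · refine List.mem_map.mpr ⟨(a, s), hs, ?_⟩
      rw [if_pos (by simp)]
      rw [hxa, hts]
    · exact List.mem_map.mpr ⟨(x, t), hmem, by simp [hxa]⟩

theorem pvOwnersOf_upd_dead (items : List (String × PySem.Set String)) (a : String)
    (s' : PySem.Set String) (hdead : ∀ s, (a, s) ∈ items → s.length ≠ 1)
    (hs' : s'.length ≠ 1) :
    pvOwnersOf (items.map (fun p => if p.1 == a then (a, s') else p))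
      = pvOwnersOf items := by
  induction items with
  | nil => rfl
  | cons q rest ih =>
    have ih' := ih (fun s hs => hdead s (List.mem_cons_of_mem _ hs))
    by_cases hq : q.1 = a
    · have hqd : q.2.length ≠ 1 := by
        have : (a, q.2) ∈ q :: rest := by
          rw [← hq]; exact List.mem_cons_self
        exact hdead q.2 this
      simp [pvOwnersOf, hq, hs', hqd] at ih' ⊢; exact ih'
    · by_cases hl : q.2.length = 1
      · simp [pvOwnersOf, hq, hl] at ih' ⊢; exact ih'
      · simp [pvOwnersOf, hq, hl] at ih' ⊢; exact ih'

theorem pvOwnersOf_upd_kill (items : List (String × PySem.Set String)) (a : String)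
    (s' : PySem.Set String) (hs' : 2 ≤ s'.length)
    (hone : ∀ s, (a, s) ∈ items → s.length = 1) :
    pvOwnersOf (items.map (fun p => if p.1 == a then (a, s') else p))
      = (pvOwnersOf items).filter (fun p => !(p.1 == a)) := by
  induction items with
  | nil => rfl
  | cons q rest ih =>
    have ih' := ih (fun s hs => hone s (List.mem_cons_of_mem _ hs))
    have hs'1 : s'.length ≠ 1 := by omega
    by_cases hq : q.1 = a
    · have hq1 : q.2.length = 1 := by
        have : (a, q.2) ∈ q :: rest := by
          rw [← hq]; exact List.mem_cons_self
        exact hone q.2 this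
      simp [pvOwnersOf, hq, hs'1, hq1] at ih' ⊢; exact ih'
    · by_cases hl : q.2.length = 1
      · simp [pvOwnersOf, hq, hl] at ih' ⊢; exact ih'
      · simp [pvOwnersOf, hq, hl] at ih' ⊢; exact ih'

theorem pvUpd_eq_self (items : List (String × PySem.Set String)) (a : String)
    (s : PySem.Set String) (huniq : ∀ t, (a, t) ∈ items → t = s) :
    items.map (fun p => if p.1 == a then (a, s) else p) = items := by
  induction items with
  | nil => rfl
  | cons q rest ih =>
    have ih' := ih (fun t ht => huniq t (List.mem_cons_of_mem _ ht))
    simp only [List.map_cons]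
    by_cases hq : q.1 = a
    · have hq2 : q.2 = s := by
        apply huniq; rw [← hq]; exact List.mem_cons_self
      rw [if_pos (by simp [hq]), ih', ← hq, ← hq2]
    · rw [if_neg (by simp [hq]), ih']

-- the keys of pvOwnersOf items are a sublist of the keys of items
theorem pvOwnersOf_keys_sublist (items : List (String × PySem.Set String)) :
    ((pvOwnersOf items).map Prod.fst).Sublist (items.map Prod.fst) := by
  unfold pvOwnersOf
  rw [List.map_map]
  have h1 : (items.filter (fun p => p.2.length == 1)).Sublist items := List.filter_sublist
  have := h1.map (f := Prod.fst)
  simpa using this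

-- one parallel step preserves the invariant
set_option maxRecDepth 4096 in
theorem pvStep_inv (d : PySem.Dict String (PySem.Set String))
    (o : PySem.Dict String String) (cf : PySem.Set String) (p : String × String)
    (h : pvInv d o cf) :
    pvInv (pvAddClaim d p.1 p.2) (pvStep (o, cf) p).1 (pvStep (o, cf) p).2 := by
  obtain ⟨h1, h2, h3, h4⟩ := h
  obtain ⟨a, c⟩ := p
  have hndo : o.keys.Nodup := by
    have : o.keys = (pvOwnersOf d.items).map Prod.fst := by
      simp [PySem.Dict.keys, h3]
    rw [this]
    exact h1.sublist (pvOwnersOf_keys_sublist d.items)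
  by_cases hcf : a ∈ cf
  · -- alias already conflicted: B skips; A's update keeps the claimant set big
    obtain ⟨s0, hs0mem, hs0len⟩ := (h4 a).mp hcf
    have hget : d.get? a = some s0 := PySem.Dict.get?_of_mem_items d hs0mem h1
    have hcont : d.contains a = true := by
      rw [PySem.Dict.contains_eq_isSome_get?, hget]; rfl
    have hgetD : d.getD a PySem.Set.empty = s0 :=
      PySem.Dict.getD_of_get?_eq_some d PySem.Set.empty hget
    have huniq : ∀ t, (a, t) ∈ d.items → t = s0 := by
      intro t ht
      have := PySem.Dict.get?_of_mem_items d ht h1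
      rw [hget] at this; exact (Option.some_inj.mp this).symm
    have hstep : pvStep (o, cf) (a, c) = (o, cf) := by
      simp [pvStep, hcf]
    set s' := PySem.Set.add s0 c with hs'
    have hs'len : 2 ≤ s'.length := by
      rw [hs']; unfold PySem.Set.add
      split
      · exact hs0len
      · simp; omega
    have hitems : (pvAddClaim d a c).items
        = d.items.map (fun p => if p.1 == a then (a, s') else p) := by
      unfold pvAddClaim
      rw [hgetD, PySem.Dict.items_insert_of_contains _ _ hcont]
    rw [hstep]
    refine ⟨?_, ?_, ?_, ?_⟩
    · show (pvAddClaim d a c).keys.Nodup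
      have : (pvAddClaim d a c).keys = d.keys := by
        simp [PySem.Dict.keys, hitems]
        intro y b hmem
        by_cases hya : y = a
        · rw [if_pos hya, hya]
        · rw [if_neg hya]
      rw [this]; exact h1
    · intro q hq
      rw [hitems] at hq
      obtain ⟨x, t⟩ := q
      rcases (pvMem_upd_iff d.items a x s' t).mp hq with ⟨_, ht, _⟩ | ⟨_, hmem⟩
      · subst ht
        intro hnil
        have hnil' : s' = [] := hnil
        rw [hnil'] at hs'len; simp at hs'len
      · exact h2 _ hmem
    · rw [hitems, pvOwnersOf_upd_dead d.items a s'
        (fun s hs => by rw [huniq s hs]; omega) (by omega)]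
      exact h3
    · intro x
      rw [hitems]
      constructor
      · intro hx
        by_cases hxa : x = a
        · subst hxa
          refine ⟨s', ?_, hs'len⟩
          rw [pvMem_upd_iff]
          exact Or.inl ⟨rfl, rfl, s0, hs0mem⟩
        · obtain ⟨s, hs, hsl⟩ := (h4 x).mp hx
          exact ⟨s, (pvMem_upd_iff d.items a x s' s).mpr (Or.inr ⟨hxa, hs⟩), hsl⟩
      · intro ⟨s, hs, hsl⟩
        rcases (pvMem_upd_iff d.items a x s' s).mp hs with ⟨hxa, _, _⟩ | ⟨hxa, hmem⟩
        · subst hxa; exact hcf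
        · exact (h4 x).mpr ⟨s, hmem, hsl⟩
  · -- alias not conflicted
    have hnotbig : ∀ s, (a, s) ∈ d.items → s.length ≤ 1 := by
      intro s hs
      by_contra hbig
      exact hcf ((h4 a).mpr ⟨s, hs, by omega⟩)
    cases hget : d.get? a with
    | none =>
      -- fresh alias
      have hcont : d.contains a = false := by
        rw [PySem.Dict.contains_eq_isSome_get?, hget]; rfl
      have hnk : a ∉ d.keys := by
        rw [← PySem.Dict.get?_eq_none_iff_not_mem_keys, hget]
      have hgetD : d.getD a PySem.Set.empty = PySem.Set.empty :=
        PySem.Dict.getD_of_not_contains d PySem.Set.empty hcont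
      have hsc : PySem.Set.add PySem.Set.empty c = [c] := by
        simp [PySem.Set.add, PySem.Set.contains, PySem.Set.empty]
      have hitems : (pvAddClaim d a c).items = d.items ++ [(a, [c])] := by
        unfold pvAddClaim
        rw [hgetD, hsc, PySem.Dict.items_insert_of_not_contains _ _ hcont]
      have hnko : a ∉ o.keys := by
        intro hko
        apply hnk
        have : o.keys = (pvOwnersOf d.items).map Prod.fst := by
          simp [PySem.Dict.keys, h3]
        rw [this] at hko
        exact (pvOwnersOf_keys_sublist d.items).mem hko
      have hconto : o.contains a = false := by
        rw [← Bool.not_eq_true, PySem.Dict.contains_iff_mem_keys]; exact hnko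
      have hgeto : o.get? a = none := by
        rw [PySem.Dict.get?_eq_none_iff_not_mem_keys]; exact hnko
      have hstep : pvStep (o, cf) (a, c) = (o.insert a c, cf) := by
        simp [pvStep, hcf, hgeto]
      rw [hstep]
      refine ⟨?_, ?_, ?_, ?_⟩
      · show (pvAddClaim d a c).keys.Nodup
        have : (pvAddClaim d a c).keys = d.keys ++ [a] := by
          simp [PySem.Dict.keys, hitems]
        rw [this]
        simp [List.nodup_append, h1]
        intro y hy hya
        exact hnk (hya ▸ hy)
      · intro q hq
        rw [hitems] at hq
        rcases List.mem_append.mp hq with hmem | hmem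
        · exact h2 _ hmem
        · simp at hmem; rw [hmem]; simp
      · show (o.insert a c).items = pvOwnersOf (pvAddClaim d a c).items
        rw [hitems, pvOwnersOf_append,
          PySem.Dict.items_insert_of_not_contains _ _ hconto, h3]
        rfl
      · intro x
        rw [hitems]
        constructor
        · intro hx
          obtain ⟨s, hs, hsl⟩ := (h4 x).mp hx
          exact ⟨s, List.mem_append_left _ hs, hsl⟩
        · intro ⟨s, hs, hsl⟩
          rcases List.mem_append.mp hs with hmem | hmem
          · exact (h4 x).mpr ⟨s, hmem, hsl⟩
          · simp at hmem
            rw [hmem.2] at hsl; simp at hsl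
    | some s =>
      have hcont : d.contains a = true := by
        rw [PySem.Dict.contains_eq_isSome_get?, hget]; rfl
      have hsmem : (a, s) ∈ d.items := PySem.Dict.mem_items_of_get?_eq_some d hget
      have hsne : s ≠ [] := h2 _ hsmem
      have hslen : s.length = 1 := by
        have := hnotbig s hsmem
        have : 1 ≤ s.length := List.length_pos_of_ne_nil hsne
        omega
      obtain ⟨c0, hc0⟩ := List.length_eq_one_iff.mp hslen
      have huniq : ∀ t, (a, t) ∈ d.items → t = s := by
        intro t ht
        have := PySem.Dict.get?_of_mem_items d ht h1
        rw [hget] at this; exact (Option.some_inj.mp this).symm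
      have hgetD : d.getD a PySem.Set.empty = s :=
        PySem.Dict.getD_of_get?_eq_some d PySem.Set.empty hget
      -- o maps a to c0
      have hoc0 : (a, c0) ∈ o.items := by
        rw [h3]
        unfold pvOwnersOf
        rw [List.mem_map]
        refine ⟨(a, s), ?_, ?_⟩
        · rw [List.mem_filter]
          exact ⟨hsmem, by simp [hslen]⟩
        · simp [hc0]
      have hgeto : o.get? a = some c0 := PySem.Dict.get?_of_mem_items o hoc0 hndo
      by_cases hcc : c0 = c
      · -- repeated identical claim: both sides keep their state
        have hsc : PySem.Set.add s c = s := by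
          simp [PySem.Set.add, PySem.Set.contains, hc0, hcc]
        have hitems : (pvAddClaim d a c).items = d.items := by
          unfold pvAddClaim
          rw [hgetD, hsc, PySem.Dict.items_insert_of_contains _ _ hcont]
          exact pvUpd_eq_self d.items a s huniq
        have hstep : pvStep (o, cf) (a, c) = (o, cf) := by
          simp [pvStep, hcf, hgeto, hcc]
        rw [hstep]
        refine ⟨?_, ?_, ?_, ?_⟩
        · show (pvAddClaim d a c).keys.Nodup
          simpa [PySem.Dict.keys, hitems] using h1
        · intro q hq; rw [hitems] at hq; exact h2 _ hq
        · rw [hitems]; exact h3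
        · intro x; rw [hitems]; exact h4 x
      · -- second distinct claimant: A's set grows to 2, B deletes the owner
        have hsc : PySem.Set.add s c = [c0, c] := by
          simp [PySem.Set.add, PySem.Set.contains, hc0, Ne.symm hcc]
        have hitems : (pvAddClaim d a c).items
            = d.items.map (fun p => if p.1 == a then (a, [c0, c]) else p) := by
          unfold pvAddClaim
          rw [hgetD, hsc, PySem.Dict.items_insert_of_contains _ _ hcont]
        have hstep : pvStep (o, cf) (a, c) = (o.erase a, PySem.Set.add cf a) := by
          simp [pvStep, hcf, hgeto, hcc]
        rw [hstep]
        refine ⟨?_, ?_, ?_, ?_⟩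
        · show (pvAddClaim d a c).keys.Nodup
          have : (pvAddClaim d a c).keys = d.keys := by
            simp [PySem.Dict.keys, hitems]
            intro y b hmem
            by_cases hya : y = a
            · rw [if_pos hya, hya]
            · rw [if_neg hya]
          rw [this]; exact h1
        · intro q hq
          rw [hitems] at hq
          obtain ⟨x, t⟩ := q
          rcases (pvMem_upd_iff d.items a x [c0, c] t).mp hq with ⟨_, ht, _⟩ | ⟨_, hmem⟩
          · rw [ht]; simp
          · exact h2 _ hmem
        · show (o.erase a).items = pvOwnersOf (pvAddClaim d a c).items
          rw [hitems, pvOwnersOf_upd_kill d.items a [c0, c] (by simp)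
            (fun t ht => by rw [huniq t ht]; exact hslen)]
          rw [← h3]
          rfl
        · intro x
          rw [hitems]
          have hmemadd : x ∈ PySem.Set.add cf a ↔ x ∈ cf ∨ x = a := by
            unfold PySem.Set.add
            by_cases h : PySem.Set.contains cf a = true
            · have ha : a ∈ cf := by simpa [PySem.Set.contains] using h
              rw [if_pos h]
              constructor
              · exact Or.inl
              · rintro (hx | rfl)
                · exact hx
                · exact ha
            · rw [if_neg h]
              simp [List.mem_append]
          rw [hmemadd]
          constructor
          · rintro (hx | rfl)
            · obtain ⟨t, ht, htl⟩ := (h4 x).mp hx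
              have hxa : x ≠ a := fun hxa => hcf (hxa ▸ hx)
              exact ⟨t, (pvMem_upd_iff d.items a x [c0, c] t).mpr (Or.inr ⟨hxa, ht⟩), htl⟩
            · refine ⟨[c0, c], ?_, by simp⟩
              rw [pvMem_upd_iff]
              exact Or.inl ⟨rfl, rfl, s, hsmem⟩
          · rintro ⟨t, ht, htl⟩
            rcases (pvMem_upd_iff d.items a x [c0, c] t).mp ht with ⟨hxa, _, _⟩ | ⟨hxa, hmem⟩
            · exact Or.inr hxa
            · exact Or.inl ((h4 x).mpr ⟨t, hmem, htl⟩)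

-- the invariant is preserved along the whole claim list
theorem pvInv_fold (l : List (String × String)) (d : PySem.Dict String (PySem.Set String))
    (o : PySem.Dict String String) (cf : PySem.Set String) (h : pvInv d o cf) :
    pvInv (l.foldl (fun d p => pvAddClaim d p.1 p.2) d)
      (l.foldl pvStep (o, cf)).1 (l.foldl pvStep (o, cf)).2 := by
  induction l generalizing d o cf with
  | nil => exact h
  | cons p t ih =>
    have hstep := pvStep_inv d o cf p h
    have : pvStep (o, cf) p = ((pvStep (o, cf) p).1, (pvStep (o, cf) p).2) := rfl
    simp only [List.foldl_cons]
    rw [this]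
    exact ih _ _ _ hstep

-- A's closing loop over claims.items builds exactly pvOwnersOf
theorem pvFinal_fold (items : List (String × PySem.Set String))
    (ao : PySem.Dict String String)
    (hfresh : ∀ p ∈ items, ao.contains p.1 = false)
    (hnd : (items.map Prod.fst).Nodup) :
    (items.foldl
        (fun ao p => if PySem.Set.len p.2 = 1 then ao.insert p.1 (p.2.headD "") else ao)
        ao).items = ao.items ++ pvOwnersOf items := by
  induction items generalizing ao with
  | nil => simp [pvOwnersOf]
  | cons p t ih =>
    rw [List.map_cons, List.nodup_cons] at hnd
    obtain ⟨hp1, hndt⟩ := hnd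
    by_cases hl : p.2.length = 1
    · have hlen : PySem.Set.len p.2 = 1 := by
        simp [PySem.Set.len, hl]
      have hcont := hfresh p List.mem_cons_self
      have hfresh' : ∀ q ∈ t, (ao.insert p.1 (p.2.headD "")).contains q.1 = false := by
        intro q hq
        rw [PySem.Dict.contains_insert]
        have hq1 : q.1 ≠ p.1 := by
          intro he
          exact hp1 (List.mem_map.mpr ⟨q, hq, he⟩)
        simp [hq1, hfresh q (List.mem_cons_of_mem _ hq)]
      rw [List.foldl_cons, if_pos hlen, ih _ hfresh' hndt,
        PySem.Dict.items_insert_of_not_contains _ _ hcont]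
      have : pvOwnersOf (p :: t) = (p.1, p.2.headD "") :: pvOwnersOf t := by
        simp [pvOwnersOf, hl]
      rw [this]
      simp
    · have hlen : ¬ PySem.Set.len p.2 = 1 := by
        simp [PySem.Set.len]
        omega
      rw [List.foldl_cons, if_neg hlen,
        ih _ (fun q hq => hfresh q (List.mem_cons_of_mem _ hq)) hndt]
      have : pvOwnersOf (p :: t) = pvOwnersOf t := by
        simp [pvOwnersOf, hl]
      rw [this]
  
-- the invariant holds after the very first claim (my_alias, my_cluster)
theorem pvInv_init (a c : String) :
    pvInv (pvAddClaim PySem.Dict.empty a c)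
      ((pvStep (PySem.Dict.empty, PySem.Set.empty) (a, c)).1)
      ((pvStep (PySem.Dict.empty, PySem.Set.empty) (a, c)).2) := by
  have hd : (pvAddClaim PySem.Dict.empty a c).items = [(a, [c])] := by
    simp [pvAddClaim, PySem.Dict.insert, PySem.Dict.contains, PySem.Dict.getD,
      PySem.Dict.get?, PySem.Dict.empty, PySem.Set.add, PySem.Set.contains,
      PySem.Set.empty]
  have hstep : pvStep (PySem.Dict.empty, PySem.Set.empty) (a, c)
      = (PySem.Dict.insert PySem.Dict.empty a c, PySem.Set.empty) := by
    simp [pvStep, PySem.Set.contains, PySem.Set.empty, PySem.Dict.get?, PySem.Dict.empty]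
  rw [hstep]
  refine ⟨?_, ?_, ?_, ?_⟩
  · simp [PySem.Dict.keys, hd]
  · intro p hp; rw [hd] at hp; simp at hp; rw [hp]; simp
  · rw [hd]
    simp [PySem.Dict.insert, PySem.Dict.contains, PySem.Dict.empty, pvOwnersOf]
  · intro x
    rw [hd]
    simp [PySem.Set.empty]

-- ===== VERDICT (by name: the statement is the Claim_ definition above) =====
theorem compute_alias_owners_spec : Claim_equal_compute_alias_owners := by
  intro my_cluster my_alias peers _hdom
  unfold Spec_compute_alias_owners compute_alias_owners compute_alias_owners_alt
  set l := (PySem.List.dedup (peers.map Prod.fst)).map (fun c => (derive_alias c, c)) with hl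
  have hfoldA : (PySem.List.dedup (peers.map Prod.fst)).foldl
      (fun d canonical => pvAddClaim d (derive_alias canonical) canonical)
      (pvAddClaim PySem.Dict.empty my_alias my_cluster)
      = l.foldl (fun d p => pvAddClaim d p.1 p.2)
        (pvAddClaim PySem.Dict.empty my_alias my_cluster) := by
    rw [hl, List.foldl_map]
  have hinv := pvInv_fold l _ _ _ (pvInv_init my_alias my_cluster)
  obtain ⟨hnd, _, h3, _⟩ := hinv
  simp only [List.foldl_cons]
  rw [hfoldA]
  rw [pvFinal_fold _ _ (fun p _ => by simp [PySem.Dict.contains, PySem.Dict.empty]) hnd]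
  rw [← h3]
  simp [PySem.Dict.empty]
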